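-- pv_equiv track=rewrite | github.com/LBarros77/Python | exercices/questao14.py | splitChars
-- ===== SOURCE A (Python) =====
-- def splitChars(chars):
--     numeric = 0
--     strings = {0:"", 1:"", 2:"", 3:""}
--     for letter in chars:
--         if letter.isupper():
--             if letter not in strings[0]:
--                 strings[0] += letter
--         elif letter.islower():
--             if letter not in strings[1]:
--                 strings[1] += letter
--         elif letter.isdigit():
--             if letter not in strings[2]:
--                 numeric += int(letter)
--                 strings[2] = f"{numeric}"
--         else:
--             strings[3] += letter
--
--     words = []
--     for n in range(len(strings)):
--         if strings[n] == "":
--             del strings[n]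
--         else:
--             words.append(strings[n])
--     return tuple(words)
-- ===== SOURCE B (Python) =====
-- def splitChars(chars):
--     upper = ""
--     for c in chars:
--         if c.isupper() and c not in upper:
--             upper += c
--     lower = ""
--     for c in chars:
--         if c.islower() and c not in lower:
--             lower += c
--     numeric = 0
--     digits = ""
--     for c in chars:
--         if c.isdigit() and c not in digits:
--             numeric += int(c)
--             digits = str(numeric)
--     other = "".join(c for c in chars if not (c.isupper() or c.islower() or c.isdigit()))
--     return tuple(s for s in (upper, lower, digits, other) if s)
-- ===== Notes on version B (the rewrite author's own statement) =====
-- stated objective: simpler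
-- what changed: A's single branching loop over a shared five-field state (numeric counter plus four category strings, assembled via a dict and a range-del loop) is replaced by four independent per-category passes (upper dedup, lower dedup, digit pass with running sum, pass-through for the rest) whose non-empty results are filtered into the output tuple.
import Mathlib
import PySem

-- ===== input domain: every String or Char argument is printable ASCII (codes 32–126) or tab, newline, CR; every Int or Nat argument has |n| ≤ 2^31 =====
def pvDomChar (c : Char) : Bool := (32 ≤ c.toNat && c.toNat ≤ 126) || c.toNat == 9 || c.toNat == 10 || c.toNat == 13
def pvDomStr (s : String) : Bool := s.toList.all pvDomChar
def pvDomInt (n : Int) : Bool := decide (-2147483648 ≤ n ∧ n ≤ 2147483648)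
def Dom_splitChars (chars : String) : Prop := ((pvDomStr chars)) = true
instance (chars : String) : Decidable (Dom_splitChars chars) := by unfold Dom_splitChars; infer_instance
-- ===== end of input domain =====

-- B replaces A's single branching loop over a five-field state by four independent
-- per-category passes assembled at the end (objective: simpler decomposition, same cost).

-- ===== PORT A =====
-- one loop over chars, state (numeric, strings[0], strings[1], strings[2], strings[3])
def pvAStep (st : Int × List Char × List Char × List Char × List Char) (c : Char) :
    Int × List Char × List Char × List Char × List Char :=
  match st with
  | (n, s0, s1, s2, s3) =>
    if PySem.Chars.isupper c then
      if c ∉ s0 then (n, s0 ++ [c], s1, s2, s3) else (n, s0, s1, s2, s3)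
    else if PySem.Chars.islower c then
      if c ∉ s1 then (n, s0, s1 ++ [c], s2, s3) else (n, s0, s1, s2, s3)
    else if PySem.Chars.isdigit c then
      if c ∉ s2 then
        -- int(letter) = c.toNat - 48, exact for a digit char; f"{numeric}" = PySem.Int.toChars
        (n + ((c.toNat : Int) - 48), s0, s1, PySem.Int.toChars (n + ((c.toNat : Int) - 48)), s3)
      else (n, s0, s1, s2, s3)
    else (n, s0, s1, s2, s3 ++ [c])

def splitChars (chars : String) : List String :=
  match chars.toList.foldl pvAStep (0, [], [], [], []) with
  | (_, s0, s1, s2, s3) =>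
    -- for n in range(4): if strings[n] == "": del …  else: words.append(strings[n])
    (([s0, s1, s2, s3].foldl (fun ws s => if s = [] then ws else ws ++ [s]) []).map String.mk)

-- ===== PORT B =====
def pvUpperStep (acc : List Char) (c : Char) : List Char :=
  if PySem.Chars.isupper c ∧ c ∉ acc then acc ++ [c] else acc

def pvLowerStep (acc : List Char) (c : Char) : List Char :=
  if PySem.Chars.islower c ∧ c ∉ acc then acc ++ [c] else acc

def pvDigitStep (st : Int × List Char) (c : Char) : Int × List Char :=
  if PySem.Chars.isdigit c ∧ c ∉ st.2 then
    (st.1 + ((c.toNat : Int) - 48), PySem.Int.toChars (st.1 + ((c.toNat : Int) - 48)))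
  else st

def pvOther (c : Char) : Bool :=
  !(PySem.Chars.isupper c || PySem.Chars.islower c || PySem.Chars.isdigit c)

def splitChars_alt (chars : String) : List String :=
  let cs := chars.toList
  let upper := cs.foldl pvUpperStep []
  let lower := cs.foldl pvLowerStep []
  let digits := (cs.foldl pvDigitStep (0, [])).2
  let other := cs.filter pvOther
  (([upper, lower, digits, other].filter (fun s => !s.isEmpty)).map String.mk)

-- ===== PRECONDITION & SPEC =====
def Spec_splitChars (chars : String) (out : List String) : Prop := out = splitChars_alt chars
instance (chars : String) (out : List String) : Decidable (Spec_splitChars chars out) := by unfold Spec_splitChars; infer_instance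

-- ===== CLAIM (what is proved, stated in full; the proofs are below) =====
def Claim_equal_splitChars : Prop := ∀ (chars : String), Dom_splitChars chars → Spec_splitChars chars (splitChars chars)

-- ===== LEMMAS AND PROOFS =====

lemma pv_upper_not_lower (c : Char) (h : PySem.Chars.isupper c = true) :
    PySem.Chars.islower c = false := by
  simp only [PySem.Chars.isupper, Bool.and_eq_true, decide_eq_true_eq] at h
  simp only [PySem.Chars.islower]
  have : ¬ ('a' ≤ c) := fun hc => absurd (hc.trans h.2) (by decide)
  simp [this]

lemma pv_upper_not_digit (c : Char) (h : PySem.Chars.isupper c = true) :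
    PySem.Chars.isdigit c = false := by
  simp only [PySem.Chars.isupper, Bool.and_eq_true, decide_eq_true_eq] at h
  simp only [PySem.Chars.isdigit]
  have : ¬ (c ≤ '9') := fun hc => absurd (hc.trans' h.1) (by decide)
  simp [this]

lemma pv_lower_not_digit (c : Char) (h : PySem.Chars.islower c = true) :
    PySem.Chars.isdigit c = false := by
  simp only [PySem.Chars.islower, Bool.and_eq_true, decide_eq_true_eq] at h
  simp only [PySem.Chars.isdigit]
  have : ¬ (c ≤ '9') := fun hc => absurd (hc.trans' h.1) (by decide)
  simp [this]

-- A's one-pass fold decomposes into B's four independent folds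
lemma pvLoop_split (cs : List Char) (n : Int) (s0 s1 s2 s3 : List Char) :
    cs.foldl pvAStep (n, s0, s1, s2, s3) =
      ((cs.foldl pvDigitStep (n, s2)).1,
       cs.foldl pvUpperStep s0,
       cs.foldl pvLowerStep s1,
       (cs.foldl pvDigitStep (n, s2)).2,
       s3 ++ cs.filter pvOther) := by
  induction cs generalizing n s0 s1 s2 s3 with
  | nil => simp
  | cons c cs ih =>
    simp only [List.foldl_cons, List.filter_cons, pvAStep, pvUpperStep, pvLowerStep,
      pvDigitStep, pvOther]
    by_cases hu : PySem.Chars.isupper c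
    · have hl := pv_upper_not_lower c hu
      have hd := pv_upper_not_digit c hu
      by_cases hm : c ∈ s0 <;> simp [hu, hl, hd, hm, ih]
    · simp only [Bool.not_eq_true] at hu
      by_cases hl : PySem.Chars.islower c
      · have hd := pv_lower_not_digit c hl
        by_cases hm : c ∈ s1 <;> simp [hu, hl, hd, hm, ih]
      · simp only [Bool.not_eq_true] at hl
        by_cases hd : PySem.Chars.isdigit c
        · by_cases hm : c ∈ s2 <;> simp [hu, hl, hd, hm, ih]
        · simp only [Bool.not_eq_true] at hd
          simp [hu, hl, hd, ih]

-- A's collect loop over the four category strings equals B's filter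
lemma pvCollect_eq_filter (xs : List (List Char)) (acc : List (List Char)) :
    xs.foldl (fun ws s => if s = [] then ws else ws ++ [s]) acc
      = acc ++ xs.filter (fun s => !s.isEmpty) := by
  induction xs generalizing acc with
  | nil => simp
  | cons s xs ih =>
    by_cases h : s = [] <;> simp [h, ih, List.append_assoc]

-- ===== VERDICT (by name: the statement is the Claim_ definition above) =====
theorem splitChars_spec : Claim_equal_splitChars := by
  intro chars _
  unfold Spec_splitChars splitChars splitChars_alt
  rw [pvLoop_split]
  dsimp only
  rw [pvCollect_eq_filter]
  simp
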